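-- pv_equiv track=rewrite | github.com/sajjadium/ctf-archives | Ricerca/2023/web/funnylfi/challenge/app/app.py | scheme_detector
-- ===== SOURCE A (Python) =====
-- def scheme_detector(url :str) -> bool:
--     bad_schemes = ["dict", "file", "ftp", "gopher", "imap", "ldap", "mqtt",
--                    "pop3", "rtmp", "rtsp", "scp", "smbs", "smtp", "telnet", "ws"]
--     url = url.lower()
--     for s in bad_schemes:
--         if s in url:
--             return True
--     return False
-- ===== SOURCE B (Python) =====
-- BAD_SCHEMES = ("dict", "file", "ftp", "gopher", "imap", "ldap", "mqtt",
--                "pop3", "rtmp", "rtsp", "scp", "smbs", "smtp", "telnet", "ws")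
--
-- def scheme_detector(url: str) -> bool:
--     u = url.lower()
--     return any(u.startswith(s, i) for i in range(len(u)) for s in BAD_SCHEMES)
-- ===== Notes on version B (the rewrite author's own statement) =====
-- stated objective: alternative
-- what changed: Replaces A's per-scheme repeated substring scans ('s in url' for each scheme, with early return) by a single left-to-right scan over the positions of the lowercased url, testing at each position whether any forbidden scheme starts there.
import Mathlib
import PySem

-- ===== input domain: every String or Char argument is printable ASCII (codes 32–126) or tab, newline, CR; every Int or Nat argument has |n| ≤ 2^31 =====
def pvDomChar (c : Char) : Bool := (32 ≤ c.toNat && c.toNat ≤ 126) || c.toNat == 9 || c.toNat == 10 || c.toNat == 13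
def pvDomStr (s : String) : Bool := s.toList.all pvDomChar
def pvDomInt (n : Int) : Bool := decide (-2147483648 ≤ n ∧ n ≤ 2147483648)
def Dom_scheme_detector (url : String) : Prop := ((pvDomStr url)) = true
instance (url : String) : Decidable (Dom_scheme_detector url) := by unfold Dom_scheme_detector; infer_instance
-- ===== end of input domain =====

-- ===== PORT A =====
-- B scans positions of the lowercased url once instead of A's per-scheme substring scans (objective: alternative).
def badSchemes : List String := ["dict", "file", "ftp", "gopher", "imap", "ldap", "mqtt",
  "pop3", "rtmp", "rtsp", "scp", "smbs", "smtp", "telnet", "ws"]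

-- the 'for s in bad_schemes: if s in url: return True' loop, with its early return
def schemeLoopA : List String → String → Bool
  | [], _ => false
  | s :: rest, u => if PySem.Str.isIn s u then true else schemeLoopA rest u

def scheme_detector (url : String) : Bool :=
  schemeLoopA badSchemes (PySem.Str.lower url)

-- ===== PORT B =====
-- u.startswith(s, i) for 0 ≤ i ≤ len(u) is exactly: s.toList is a prefix of u.toList.drop i
def scheme_detector_alt (url : String) : Bool :=
  let u := (PySem.Str.lower url).toList
  (List.range u.length).any (fun i => badSchemes.any (fun s => PySem.Chars.startswith (u.drop i) s.toList))

-- ===== PRECONDITION & SPEC =====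

def Spec_scheme_detector (url : String) (out : Bool) : Prop := out = scheme_detector_alt url
instance (url : String) (out : Bool) : Decidable (Spec_scheme_detector url out) := by unfold Spec_scheme_detector; infer_instance

-- ===== CLAIM (what is proved, stated in full; the proofs are below) =====
def Claim_equal_scheme_detector : Prop := ∀ (url : String), Dom_scheme_detector url → Spec_scheme_detector url (scheme_detector url)

-- ===== LEMMAS AND PROOFS =====

-- ===== VERDICT (by name: the statement is the Claim_ definition above) =====
-- per-scheme bridge: for a nonempty pattern, 'sub in u' ↔ some position of u starts with sub
lemma isIn_iff_exists_pos (sub u : List Char) (hsub : sub ≠ []) :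
    PySem.Chars.isIn sub u = true ↔ ∃ i < u.length, sub <+: u.drop i := by
  rw [PySem.Chars.isIn_iff_infix]
  constructor
  · rintro h
    obtain ⟨j, hj⟩ := (PySem.Chars.exists_prefix_drop_iff_isIn sub u).2
      ((PySem.Chars.isIn_iff_infix sub u).2 h)
    refine ⟨j, ?_, hj⟩
    by_contra hlt
    push Not at hlt
    rw [List.drop_eq_nil_of_le hlt] at hj
    exact hsub (List.prefix_nil.mp hj)
  · rintro ⟨i, _, hj⟩
    exact (PySem.Chars.isIn_iff_infix sub u).1
      ((PySem.Chars.exists_prefix_drop_iff_isIn sub u).1 ⟨i, hj⟩)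

lemma schemeLoopA_eq_any (l : List String) (u : String) :
    schemeLoopA l u = l.any (fun s => PySem.Str.isIn s u) := by
  induction l with
  | nil => rfl
  | cons s rest ih =>
      simp only [schemeLoopA, List.any_cons, ih]
      by_cases h : PySem.Str.isIn s u <;> simp [*]

theorem scheme_detector_spec : Claim_equal_scheme_detector := by
  intro url _
  unfold Spec_scheme_detector scheme_detector scheme_detector_alt
  rw [schemeLoopA_eq_any]
  rw [Bool.eq_iff_iff]
  simp only [List.any_eq_true, List.mem_range, PySem.Chars.startswith_iff]
  constructor
  · rintro ⟨s, hs, h⟩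
    have hne : s.toList ≠ [] := by
      have : s ∈ badSchemes := hs
      fin_cases this <;> decide
    rw [PySem.Str.isIn_iff_infix, ← PySem.Chars.isIn_iff_infix] at h
    obtain ⟨i, hi, hp⟩ := (isIn_iff_exists_pos _ _ hne).1 h
    exact ⟨i, hi, s, hs, hp⟩
  · rintro ⟨i, hi, s, hs, hp⟩
    refine ⟨s, hs, ?_⟩
    rw [PySem.Str.isIn_iff_infix, ← PySem.Chars.isIn_iff_infix]
    exact (PySem.Chars.exists_prefix_drop_iff_isIn _ _).1 ⟨i, hp⟩
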